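-- pv_equiv track=rewrite | github.com/ukogan/feed | bridge-watch/services/nbi_client.py | _classify_condition
-- ===== SOURCE A (Python) =====
-- def _classify_condition(deck: int | None, superstructure: int | None,
--                         substructure: int | None) -> str:
--     """Return 'good', 'fair', or 'poor' based on the worst rating."""
--     ratings = [r for r in (deck, superstructure, substructure) if r is not None]
--     if not ratings:
--         return "unknown"
--     worst = min(ratings)
--     if worst <= 4:
--         return "poor"
--     if worst <= 6:
--         return "fair"
--     return "good"
-- ===== SOURCE B (Python) =====
-- def _classify_condition(deck, superstructure, substructure):
--     """Classify each rating individually and keep the worst condition seen."""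
--     worst_sev = None  # 0 = good, 1 = fair, 2 = poor
--     for r in (deck, superstructure, substructure):
--         if r is None:
--             continue
--         sev = 2 if r <= 4 else (1 if r <= 6 else 0)
--         worst_sev = sev if worst_sev is None else max(worst_sev, sev)
--     if worst_sev is None:
--         return "unknown"
--     return ("good", "fair", "poor")[worst_sev]
-- ===== Notes on version B (the rewrite author's own statement) =====
-- stated objective: alternative
-- what changed: B classifies each non-None rating into a severity rank (map) and reduces by max over severities in one pass, instead of taking min of the collected ratings and thresholding once.
import Mathlib
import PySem

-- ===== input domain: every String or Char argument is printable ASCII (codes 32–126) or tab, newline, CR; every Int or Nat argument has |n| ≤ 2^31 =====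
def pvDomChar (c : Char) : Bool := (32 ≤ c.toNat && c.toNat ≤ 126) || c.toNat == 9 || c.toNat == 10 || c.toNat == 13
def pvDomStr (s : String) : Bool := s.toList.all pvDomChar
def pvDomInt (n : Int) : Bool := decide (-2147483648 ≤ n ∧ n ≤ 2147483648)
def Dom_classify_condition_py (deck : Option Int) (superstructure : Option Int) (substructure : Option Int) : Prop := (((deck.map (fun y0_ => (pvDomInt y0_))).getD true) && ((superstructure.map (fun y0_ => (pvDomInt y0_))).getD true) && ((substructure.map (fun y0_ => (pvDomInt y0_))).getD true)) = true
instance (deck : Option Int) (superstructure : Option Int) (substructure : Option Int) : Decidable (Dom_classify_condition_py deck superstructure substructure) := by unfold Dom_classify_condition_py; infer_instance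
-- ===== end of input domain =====

-- ===== PORT A =====
-- A: collect non-None ratings, take min, threshold once
def classify_condition_py (deck : Option Int) (superstructure : Option Int) (substructure : Option Int) : String :=
  let ratings : List Int := [deck, superstructure, substructure].filterMap id
  match PySem.List.min? ratings (fun x => x) with
  | none => "unknown"
  | some worst =>
    if worst ≤ 4 then "poor"
    else if worst ≤ 6 then "fair"
    else "good"

-- ===== PORT B =====
-- B: classify each rating into a severity rank, keep the worst seen (return-value equivalence; one honest line: per-element classification reduced by max, instead of min-then-threshold)
def pvSev (r : Int) : Nat := if r ≤ 4 then 2 else if r ≤ 6 then 1 else 0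
def pvStep (acc : Option Nat) (r : Option Int) : Option Nat :=
  match r with
  | none => acc
  | some v => some (match acc with | none => pvSev v | some a => max a (pvSev v))
def classify_condition_py_alt (deck : Option Int) (superstructure : Option Int) (substructure : Option Int) : String :=
  match [deck, superstructure, substructure].foldl pvStep none with
  | none => "unknown"
  | some 2 => "poor"
  | some 1 => "fair"
  | some _ => "good"

-- ===== PRECONDITION & SPEC =====
def Spec_classify_condition_py (deck : Option Int) (superstructure : Option Int) (substructure : Option Int) (out : String) : Prop := out = classify_condition_py_alt deck superstructure substructure
instance (deck : Option Int) (superstructure : Option Int) (substructure : Option Int) (out : String) : Decidable (Spec_classify_condition_py deck superstructure substructure out) := by unfold Spec_classify_condition_py; infer_instance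

-- ===== CLAIM (what is proved, stated in full; the proofs are below) =====
def Claim_equal_classify_condition_py : Prop := ∀ (deck : Option Int) (superstructure : Option Int) (substructure : Option Int), Dom_classify_condition_py deck superstructure substructure → Spec_classify_condition_py deck superstructure substructure (classify_condition_py deck superstructure substructure)

-- ===== LEMMAS AND PROOFS =====

-- severity is antitone, so the severity of the min is the max of the severities
theorem pvSev_min (x y : Int) : pvSev (min x y) = max (pvSev x) (pvSev y) := by
  simp only [pvSev, min_def]
  split_ifs <;> omega

-- thresholding a rating equals dispatching on its severity rank
theorem pvFinish (w : Int) :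
    (if w ≤ 4 then "poor" else if w ≤ 6 then "fair" else "good")
      = (match (some (pvSev w) : Option Nat) with
         | none => "unknown" | some 2 => "poor" | some 1 => "fair" | some _ => "good") := by
  simp only [pvSev]
  split_ifs <;> rfl

-- ===== VERDICT (by name: the statement is the Claim_ definition above) =====
theorem classify_condition_py_spec : Claim_equal_classify_condition_py := by
  intro deck superstructure substructure _
  unfold Spec_classify_condition_py classify_condition_py classify_condition_py_alt
  rcases deck with _ | a <;> rcases superstructure with _ | b <;> rcases substructure with _ | c <;>
    simp only [List.filterMap_cons, List.filterMap_nil, id,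
               List.foldl_cons, List.foldl_nil, pvStep] <;>
    (try rw [PySem.List.min?_id_cons]) <;>
    (try simp only [List.foldl_cons, List.foldl_nil]) <;>
    (repeat rw [← pvSev_min]) <;>
    first | rfl | exact pvFinish _
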